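-- pv_equiv track=rewrite | github.com/namysl/IS-archive-py | Python_archiwum/aisd_lab/Zestaw1_zad1-8.py | najwiekszy_indeks_el_min
-- ===== SOURCE A (Python) =====
-- def najwiekszy_indeks_el_min(A):
--     minimum = A[0]
--     indeks = 0
--     for i in range(len(A)):
--         if A[i] <= minimum:
--             minimum = A[i]
--             indeks = i
--     return indeks
-- ===== SOURCE B (Python) =====
-- def najwiekszy_indeks_el_min(A):
--     # pass 1: the minimum value (seeded by A[0], so empty input still raises IndexError)
--     minimum = A[0]
--     for x in A:
--         if x < minimum:
--             minimum = x
--     # pass 2: first index from the right holding that value = largest index of the minimum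
--     for i, x in reversed(list(enumerate(A))):
--         if x == minimum:
--             return i
-- ===== Notes on version B (the rewrite author's own statement) =====
-- stated objective: alternative
-- what changed: A's single combined sweep (tracking minimum and index together with <=) is replaced by two separate passes: a plain forward min-scan, then a backward scan returning the first index holding the minimum.
import Mathlib
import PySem

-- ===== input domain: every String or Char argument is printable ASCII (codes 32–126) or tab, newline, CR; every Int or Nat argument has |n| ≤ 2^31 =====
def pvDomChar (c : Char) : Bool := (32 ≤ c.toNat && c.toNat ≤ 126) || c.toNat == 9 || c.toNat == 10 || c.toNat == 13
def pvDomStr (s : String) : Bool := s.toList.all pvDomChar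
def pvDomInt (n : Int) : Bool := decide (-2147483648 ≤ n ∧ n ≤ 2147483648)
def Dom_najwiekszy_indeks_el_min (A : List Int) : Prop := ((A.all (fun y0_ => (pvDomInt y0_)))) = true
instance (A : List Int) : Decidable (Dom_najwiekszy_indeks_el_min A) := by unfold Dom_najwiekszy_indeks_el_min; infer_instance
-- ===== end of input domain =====

-- B replaces A's combined min+index sweep by two separate passes (forward min-scan,
-- then backward search for the minimum); same O(n) cost, different decomposition.

-- ===== PORT A =====
-- minimum = A[0]; indeks = 0; for i in range(len(A)): if A[i] <= minimum: minimum, indeks = A[i], i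
def najwiekszy_indeks_el_min (A : List Int) : Int :=
  match A with
  | [] => 0   -- unreachable under Pre_ (Python raises IndexError on A[0])
  | a :: _ =>
    ((PySem.List.pyRange 0 (A.length : Int) 1).foldl
      (fun (s : Int × Int) i =>
        if PySem.List.pyGetD A i 0 ≤ s.1 then (PySem.List.pyGetD A i 0, i) else s)
      (a, 0)).2

-- ===== PORT B =====
def najwiekszy_indeks_el_min_alt (A : List Int) : Int :=
  match A with
  | [] => 0   -- unreachable under Pre_ (Python raises IndexError on A[0])
  | a :: _ =>
    let minimum := A.foldl (fun acc x => if x < acc then x else acc) a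
    (((PySem.List.enumerate A 0).reverse.findSome?
        (fun p => if p.2 == minimum then some p.1 else none)).getD 0)

-- ===== PRECONDITION & SPEC =====
-- Pre_ excludes only the empty list, on which Python A raises IndexError.
def Pre_najwiekszy_indeks_el_min (A : List Int) : Prop := A ≠ []
instance (A : List Int) : Decidable (Pre_najwiekszy_indeks_el_min A) := by unfold Pre_najwiekszy_indeks_el_min; infer_instance
def pvWitness_najwiekszy_indeks_el_min : List Int := [3, 1, 2, 1]

def Spec_najwiekszy_indeks_el_min (A : List Int) (out : Int) : Prop := out = najwiekszy_indeks_el_min_alt A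
instance (A : List Int) (out : Int) : Decidable (Spec_najwiekszy_indeks_el_min A out) := by unfold Spec_najwiekszy_indeks_el_min; infer_instance

-- ===== CLAIM (what is proved, stated in full; the proofs are below) =====
def Claim_equal_najwiekszy_indeks_el_min : Prop := ∀ (A : List Int), Dom_najwiekszy_indeks_el_min A → Pre_najwiekszy_indeks_el_min A → Spec_najwiekszy_indeks_el_min A (najwiekszy_indeks_el_min A)

-- ===== LEMMAS AND PROOFS =====

-- A's fold and B's two passes agree: on l = a :: t the combined fold returns
-- (minimum, j) where minimum is B's running min and j is the index B's backward
-- search finds.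
theorem pv_main (a : Int) (t : List Int) :
    ∃ j : Int,
      (PySem.List.enumerate (a :: t) 0).foldl
        (fun (s : Int × Int) p => if p.2 ≤ s.1 then (p.2, p.1) else s) (a, 0)
        = ((a :: t).foldl (fun acc x => if x < acc then x else acc) a, j)
      ∧ (PySem.List.enumerate (a :: t) 0).reverse.findSome?
          (fun p => if p.2 == (a :: t).foldl (fun acc x => if x < acc then x else acc) a
                    then some p.1 else none) = some j := by
  induction t using List.reverseRecOn with
  | nil =>
    exact ⟨0, by simp [PySem.List.enumerate]⟩
  | append_singleton t' y ih =>
    obtain ⟨j, hfold, hfind⟩ := ih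
    have hl : a :: (t' ++ [y]) = (a :: t') ++ [y] := rfl
    set m := (a :: t').foldl (fun acc x => if x < acc then x else acc) a with hm
    have hmin2 : ((a :: t') ++ [y]).foldl (fun acc x => if x < acc then x else acc) a
        = if y < m then y else m := by rw [List.foldl_append, ← hm]; rfl
    have henum : PySem.List.enumerate ((a :: t') ++ [y]) 0
        = PySem.List.enumerate (a :: t') 0 ++ [(((a :: t').length : Int), y)] := by
      rw [PySem.List.enumerate_append]
      simp [PySem.List.enumerate_cons, PySem.List.enumerate_nil]
    rw [hl, hmin2, henum, List.foldl_append, hfold]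
    simp only [List.foldl_cons, List.foldl_nil, List.reverse_append, List.reverse_cons,
      List.reverse_nil, List.nil_append, List.cons_append, List.findSome?_cons]
    by_cases hy : y ≤ m
    · -- new minimum is y, new index is the position of y
      have h1 : (if y < m then y else m) = y := by
        by_cases h : y < m <;> simp [h]; omega
      refine ⟨((a :: t').length : Int), ?_, ?_⟩
      · simp [hy, h1]
      · rw [h1]; simp
    · -- element larger than the minimum: both state and search result unchanged
      have h1 : (if y < m then y else m) = m := by
        have : ¬ y < m := by omega
        simp [this]
      have hne : y ≠ m := by omega
      refine ⟨j, ?_, ?_⟩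
      · simp [hy, h1]
      · rw [h1]
        simp only [beq_iff_eq, hne, if_false]
        simpa using hfind

-- ===== VERDICT (by name: the statement is the Claim_ definition above) =====
theorem najwiekszy_indeks_el_min_spec : Claim_equal_najwiekszy_indeks_el_min := by
  intro A _ hpre
  unfold Spec_najwiekszy_indeks_el_min najwiekszy_indeks_el_min najwiekszy_indeks_el_min_alt
  match A, hpre with
  | a :: t, _ =>
    obtain ⟨j, hfold, hfind⟩ := pv_main a t
    have henum := PySem.List.enumerate_eq_map_pyRange (xs := a :: t) (d := (0 : Int))
    rw [PySem.List.len_eq] at henum  -- align the length cast if needed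
    simp only []
    rw [show ((PySem.List.pyRange 0 ((a :: t).length : Int) 1).foldl
        (fun (s : Int × Int) i =>
          if PySem.List.pyGetD (a :: t) i 0 ≤ s.1 then (PySem.List.pyGetD (a :: t) i 0, i) else s)
        (a, 0)) = (PySem.List.enumerate (a :: t) 0).foldl
        (fun (s : Int × Int) p => if p.2 ≤ s.1 then (p.2, p.1) else s) (a, 0) from by
      rw [henum, List.foldl_map]]
    rw [hfold, hfind]
    rfl
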